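-- pv_equiv track=rewrite | github.com/akaowen7/CEG-lab2 | packet_sender.py | groupHex
-- ===== SOURCE A (Python) =====
-- def groupHex(hexList):
--     groupedHex = []
--     for i in range(0, len(hexList), 2):
--         # If the hex value is less than 16, add a 0 to the front
--         if len(hexList[i]) == 3:
--             hexList[i] = '0x0' + hexList[i][2]
--         if len(hexList[i + 1]) == 3:
--             hexList[i + 1] = '0x0' + hexList[i + 1][2]
--
--         # Combine the two hex values into one string
--         groupedHex.append(str(hexList[i][2:]) + str(hexList[i + 1][2:]))
--     return groupedHex
-- ===== SOURCE B (Python) =====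
-- def groupHex(hexList):
--     # Consumes a working copy from the END, two pops at a time, building the
--     # grouped strings in reverse and un-reversing once at the end.  (A loops
--     # forward by index and pads hexList in place; the return value is the
--     # same, B does not mutate its argument.)
--     out = []
--     work = list(hexList)
--     while len(work) >= 2:
--         b = work.pop()
--         a = work.pop()
--         out.append(_digits(a) + _digits(b))
--     out.reverse()
--     return out
--
--
-- def _digits(s):
--     return '0' + s[2] if len(s) == 3 else s[2:]
-- ===== Notes on version B (the rewrite author's own statement) =====
-- stated objective: alternative
-- what changed: B replaces A's forward even-index loop with in-place list mutation by a pure backward consumption: it pops pairs off the end of a working copy, accumulates the grouped strings in reverse order and reverses once at the end; B does not mutate hexList.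
import Mathlib
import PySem

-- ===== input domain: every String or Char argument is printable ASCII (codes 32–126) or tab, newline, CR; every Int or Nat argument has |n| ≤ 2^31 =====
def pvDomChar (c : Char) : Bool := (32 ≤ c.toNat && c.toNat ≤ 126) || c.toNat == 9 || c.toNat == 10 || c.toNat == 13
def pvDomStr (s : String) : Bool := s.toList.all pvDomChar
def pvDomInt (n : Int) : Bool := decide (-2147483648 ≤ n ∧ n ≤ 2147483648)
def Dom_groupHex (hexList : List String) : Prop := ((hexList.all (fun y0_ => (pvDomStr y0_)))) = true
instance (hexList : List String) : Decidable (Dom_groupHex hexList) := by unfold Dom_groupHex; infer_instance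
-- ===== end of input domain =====

-- B pops pairs off the END of a working copy, building the result in reverse and
-- reversing once at the end (return value only: A pads hexList in place, B does not).

-- ===== PORT A =====
-- hexList[i][2] as a one-character string (only reached when len(hexList[i]) == 3)
def groupHexAt2 (s : String) : String :=
  match PySem.Str.pyGet? s 2 with
  | some c => String.singleton c
  | none => ""

-- the body of A's two 'if len(...) == 3:' statements: the in-place pad of entry j
def groupHexPad (lst : List String) (j : Int) (s : String) : List String :=
  if PySem.Str.len s = 3 then PySem.List.pySetD lst j ("0x0" ++ groupHexAt2 s) else lst

theorem length_groupHexPad (lst : List String) (j : Int) (s : String) :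
    (groupHexPad lst j s).length = lst.length := by
  unfold groupHexPad; split <;> simp [PySem.List.length_pySetD]

-- the 'for i in range(0, len(hexList), 2)' loop; lst is the (mutated) list, acc is groupedHex
def groupHexLoop (lst acc : List String) (i : Nat) : List String :=
  if h : i < lst.length then
    let lst1 := groupHexPad lst (i : Int) (PySem.List.pyGetD lst (i : Int) "")
    match PySem.List.pyGet? lst1 ((i + 1 : Nat) : Int) with
    | none => acc   -- IndexError on odd-length input; excluded by Pre_
    | some t =>
      let lst2 := groupHexPad lst1 ((i + 1 : Nat) : Int) t
      groupHexLoop lst2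
        (acc ++ [PySem.Str.slice (PySem.List.pyGetD lst2 (i : Int) "") (some 2) none ++
                 PySem.Str.slice (PySem.List.pyGetD lst2 ((i + 1 : Nat) : Int) "") (some 2) none])
        (i + 2)
  else acc
  termination_by lst.length - i
  decreasing_by simp [length_groupHexPad]; omega

def groupHex (hexList : List String) : List String :=
  groupHexLoop hexList [] 0

-- ===== PORT B =====
-- _digits(s): '0' + s[2] if len(s) == 3 else s[2:]
def groupHexDigits (s : String) : String :=
  if PySem.Str.len s = 3 then
    "0" ++ (match PySem.Str.pyGet? s 2 with | some c => String.singleton c | none => "")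
  else PySem.Str.slice s (some 2) none

-- the 'while len(work) >= 2' loop: b = work.pop(); a = work.pop(); out.append(...)
def groupHexAltLoop (work out : List String) : List String :=
  if h : 2 ≤ work.length then
    match h1 : PySem.List.pop? work (-1) with
    | none => out.reverse   -- unreachable: work is nonempty
    | some r =>
      match h2 : PySem.List.pop? r.2 (-1) with
      | none => out.reverse   -- unreachable: r.2 is nonempty
      | some r2 =>
        groupHexAltLoop r2.2 (out ++ [groupHexDigits r2.1 ++ groupHexDigits r.1])
  else out.reverse
  termination_by work.length
  decreasing_by
    have e1 := PySem.List.length_of_pop?_eq_some _ h1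
    have e2 := PySem.List.length_of_pop?_eq_some _ h2
    omega

def groupHex_alt (hexList : List String) : List String :=
  groupHexAltLoop hexList []

-- ===== PRECONDITION & SPEC =====
-- Pre_ excludes exactly the odd-length lists, on which A raises IndexError.
def Pre_groupHex (hexList : List String) : Prop := hexList.length % 2 = 0
instance (hexList : List String) : Decidable (Pre_groupHex hexList) := by
  unfold Pre_groupHex; infer_instance
def pvWitness_groupHex : List String := ["0x1", "0x23"]

def Spec_groupHex (hexList : List String) (out : List String) : Prop := out = groupHex_alt hexList
instance (hexList : List String) (out : List String) : Decidable (Spec_groupHex hexList out) := by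
  unfold Spec_groupHex; infer_instance

-- ===== CLAIM (what is proved, stated in full; the proofs are below) =====
def Claim_equal_groupHex : Prop := ∀ (hexList : List String), Dom_groupHex hexList → Pre_groupHex hexList → Spec_groupHex hexList (groupHex hexList)

-- ===== LEMMAS AND PROOFS =====

-- consecutive disjoint pairs (proof-side characterisation both ports are reduced to)
def groupHexPairs : List String → List (String × String)
  | a :: b :: rest => (a, b) :: groupHexPairs rest
  | _ => []

-- bridge lemmas: pySetD/pyGetD at the Int index ↑i + 1
theorem pySetD_int_succ {α : Type} (xs : List α) (i : Nat) (v : α) :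
    PySem.List.pySetD xs ((i : Int) + 1) v = xs.set (i + 1) v := by
  have h : ((i : Int) + 1) = ((i + 1 : Nat) : Int) := by push_cast; ring
  rw [h, PySem.List.pySetD_natCast]

theorem pyGetD_int_succ {α : Type} (xs : List α) (i : Nat) (d : α) :
    PySem.List.pyGetD xs ((i : Int) + 1) d = xs.getD (i + 1) d := by
  have h : ((i : Int) + 1) = ((i + 1 : Nat) : Int) := by push_cast; ring
  rw [h, PySem.List.pyGetD_natCast]

-- the string A appends for one entry equals B's _digits(s)
theorem slice2_pad (s : String) :
    PySem.Str.slice (if PySem.Str.len s = 3 then "0x0" ++ groupHexAt2 s else s) (some 2) none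
      = groupHexDigits s := by
  rw [← String.toList_inj]
  unfold groupHexDigits groupHexAt2
  by_cases h : PySem.Str.len s = 3
  · have hl : s.toList.length = 3 := by
      have := PySem.Str.len_eq s
      rw [this] at h
      exact_mod_cast h
    obtain ⟨a, b, c, hs⟩ := List.length_eq_three.mp hl
    have h2 : PySem.Str.pyGet? s 2 = some c := by
      simp [PySem.Str.pyGet?, hs, PySem.List.pyGet?, PySem.List.pyIdx?]
    rw [if_pos h, if_pos h, h2]
    rw [PySem.Str.toList_slice]
    simp [PySem.List.slice_from _ (by norm_num : (0:Int) ≤ 2)]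
  · rw [if_neg h, if_neg h]

theorem groupHexLoop_eq (n : Nat) : ∀ (lst acc : List String) (i : Nat),
    lst.length - i = n → (lst.length - i) % 2 = 0 →
    groupHexLoop lst acc i =
      acc ++ (groupHexPairs (lst.drop i)).map (fun p => groupHexDigits p.1 ++ groupHexDigits p.2) := by
  induction n using Nat.strong_induction_on with
  | _ n ih =>
  intro lst acc i hn h2
  rw [groupHexLoop]
  split
  · rename_i h
    have hi1 : i + 1 < lst.length := by omega
    have hg : PySem.List.pyGetD lst (i : Int) "" = lst[i] := by
      simp [List.getElem?_eq_getElem h]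
    simp only [hg]
    have hlen1 : (groupHexPad lst (i : Int) lst[i]).length = lst.length :=
      length_groupHexPad ..
    have ht : (groupHexPad lst (i : Int) lst[i])[i+1]'(by omega) = lst[i+1] := by
      unfold groupHexPad
      split
      · simp [List.getElem_set, (by omega : ¬ i = i + 1)]
      · rfl
    have hsome : PySem.List.pyGet? (groupHexPad lst (i : Int) lst[i]) ((i + 1 : Nat) : Int)
        = some lst[i+1] := by
      rw [PySem.List.pyGet?_natCast, List.getElem?_eq_getElem (by omega), ht]
    simp only [hsome]
    -- values read back after both pads
    have e1 : PySem.List.pyGetD (groupHexPad (groupHexPad lst (i : Int) lst[i]) ((i + 1 : Nat) : Int) lst[i+1]) (i : Int) ""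
        = (if PySem.Str.len lst[i] = 3 then "0x0" ++ groupHexAt2 lst[i] else lst[i]) := by
      unfold groupHexPad
      split <;> split <;>
        simp_all [pySetD_int_succ, pyGetD_int_succ, List.getElem_set, List.getD_eq_getElem?_getD,
                  List.getElem?_eq_getElem, (by omega : ¬ i + 1 = i), (by omega : ¬ i = i + 1), h, hi1]
    have e2 : PySem.List.pyGetD (groupHexPad (groupHexPad lst (i : Int) lst[i]) ((i + 1 : Nat) : Int) lst[i+1]) ((i + 1 : Nat) : Int) ""
        = (if PySem.Str.len lst[i+1] = 3 then "0x0" ++ groupHexAt2 lst[i+1] else lst[i+1]) := by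
      unfold groupHexPad
      split <;> split <;>
        simp_all [pySetD_int_succ, pyGetD_int_succ, List.getElem_set, List.getD_eq_getElem?_getD,
                  List.getElem?_eq_getElem, (by omega : ¬ i + 1 = i), (by omega : ¬ i = i + 1), h, hi1]
    have hlen2 : (groupHexPad (groupHexPad lst (i : Int) lst[i]) ((i + 1 : Nat) : Int) lst[i+1]).length = lst.length := by
      rw [length_groupHexPad, length_groupHexPad]
    have hdrop : (groupHexPad (groupHexPad lst (i : Int) lst[i]) ((i + 1 : Nat) : Int) lst[i+1]).drop (i+2) = lst.drop (i+2) := by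
      unfold groupHexPad
      split <;> split <;>
        simp_all [pySetD_int_succ, List.drop_set, (by omega : i < i + 2), (by omega : i + 1 < i + 2)]
    rw [ih (n - 2) (by omega) _ _ (i + 2) (by omega) (by omega)]
    rw [hdrop, e1, e2, slice2_pad, slice2_pad]
    have hdi : lst.drop i = lst[i] :: lst[i+1] :: lst.drop (i+2) := by
      rw [List.drop_eq_getElem_cons h, List.drop_eq_getElem_cons hi1]
    rw [hdi]
    simp [groupHexPairs]
  · rename_i h
    have : lst.drop i = [] := List.drop_eq_nil_of_le (by omega)
    simp [this, groupHexPairs]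

theorem pairs_append : ∀ (l : List String) (a b : String), l.length % 2 = 0 →
    groupHexPairs (l ++ [a, b]) = groupHexPairs l ++ [(a, b)]
  | [], a, b, _ => by simp [groupHexPairs]
  | [x], a, b, h => by simp at h
  | x :: y :: rest, a, b, h => by
      simp only [List.length_cons] at h
      simp only [List.cons_append, groupHexPairs]
      rw [pairs_append rest a b (by omega)]

theorem groupHexAltLoop_eq (n : Nat) : ∀ (work out : List String), work.length = n → work.length % 2 = 0 →
    groupHexAltLoop work out =
      (out ++ ((groupHexPairs work).map (fun p => groupHexDigits p.1 ++ groupHexDigits p.2)).reverse).reverse := by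
  induction n using Nat.strong_induction_on with
  | _ n ih =>
  intro work out hn h2
  by_cases h : 2 ≤ work.length
  · have hlt1 : work.length - 2 + 1 < work.length := by omega
    have hsplit : work = work.take (work.length - 2) ++ [work[work.length - 2]'(by omega), work[work.length - 2 + 1]'hlt1] := by
      conv_lhs => rw [← List.take_append_drop (work.length - 2) work]
      congr 1
      rw [List.drop_eq_getElem_cons (by omega : work.length - 2 < work.length), List.drop_eq_getElem_cons hlt1]
      have hnil : work.drop (work.length - 2 + 2) = [] := List.drop_eq_nil_of_le (by omega)
      simp [hnil]
    have hp1 : PySem.List.pop? work (-1) = some (work[work.length - 2 + 1]'hlt1,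
        work.take (work.length - 2) ++ [work[work.length - 2]'(by omega)]) := by
      conv_lhs => rw [hsplit]
      rw [show work.take (work.length - 2) ++ [work[work.length - 2]'(by omega), work[work.length - 2 + 1]'hlt1]
            = (work.take (work.length - 2) ++ [work[work.length - 2]'(by omega)]) ++ [work[work.length - 2 + 1]'hlt1] from List.append_cons _ _ _]
      exact PySem.List.pop?_last ..
    have hp2 : PySem.List.pop? (work.take (work.length - 2) ++ [work[work.length - 2]'(by omega)]) (-1)
        = some (work[work.length - 2]'(by omega), work.take (work.length - 2)) := PySem.List.pop?_last ..
    have htl : (work.take (work.length - 2)).length = work.length - 2 := by simp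
    have hrec := ih (work.length - 2) (by omega) (work.take (work.length - 2))
        (out ++ [groupHexDigits (work[work.length - 2]'(by omega)) ++ groupHexDigits (work[work.length - 2 + 1]'hlt1)])
        htl (by rw [htl]; omega)
    rw [groupHexAltLoop, dif_pos h, hp1]
    simp only [hp2]
    rw [hp2]
    simp only [hrec]
    conv_rhs => rw [hsplit]
    rw [pairs_append _ _ _ (by rw [htl]; omega)]
    simp
  · have : work = [] := by
      match work, h2 with
      | [], _ => rfl
      | [x], h2 => simp at h2
      | x :: y :: t, _ => simp at h
    rw [groupHexAltLoop]
    simp [this, groupHexPairs]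

theorem groupHex_alt_eq (lst : List String) (h2 : lst.length % 2 = 0) :
    groupHex_alt lst = (groupHexPairs lst).map (fun p => groupHexDigits p.1 ++ groupHexDigits p.2) := by
  unfold groupHex_alt
  rw [groupHexAltLoop_eq lst.length lst [] rfl h2]
  simp

-- ===== VERDICT (by name: the statement is the Claim_ definition above) =====
theorem groupHex_spec : Claim_equal_groupHex := by
  intro hexList _ hpre
  unfold Spec_groupHex groupHex
  rw [groupHexLoop_eq (hexList.length - 0) hexList [] 0 rfl (by simpa using hpre),
      groupHex_alt_eq hexList hpre]
  simp
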